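-- pv_equiv track=rewrite | github.com/sailfishos/profiled | depend_filter.py | dep_filter
-- ===== SOURCE A (Python) =====
-- def dep_filter(deps):
--     src, hdr = [], {}
--
--     for dep in deps:
--         if dep.endswith(".c"):
--             src.append(dep)
--         elif dep.startswith("/"):
--             continue
--         elif not dep in hdr:
--             hdr[dep] = None
--     hdr = list(hdr.keys())
--     hdr.sort(key=lambda x:(x.count("/"), x))
--     return src + hdr
-- ===== SOURCE B (Python) =====
-- def dep_filter(deps):
--     # Single pass: keep sources in order; keep headers in a list that is
--     # maintained sorted by (slash count, name) and duplicate-free via ordered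
--     # insertion, so no dict and no final sort are needed.  Correct because the
--     # key (x.count("/"), x) totally orders distinct headers, so the insertion
--     # position is unique and duplicates meet their equal in place.
--     src = []
--     hdr = []
--     for dep in deps:
--         if dep.endswith(".c"):
--             src.append(dep)
--         elif not dep.startswith("/"):
--             k = (dep.count("/"), dep)
--             i = 0
--             while i < len(hdr) and (hdr[i].count("/"), hdr[i]) < k:
--                 i += 1
--             if i == len(hdr) or hdr[i] != dep:
--                 hdr.insert(i, dep)
--     return src + hdr
-- ===== Notes on version B (the rewrite author's own statement) =====
-- stated objective: alternative
-- what changed: Replaces A's branched loop with a dict-as-ordered-set followed by a final sort by a single pass that maintains the header list sorted-and-deduplicated via ordered insertion (no dict, no sort call); correct because the key (x.count('/'), x) totally orders distinct headers, so the insertion point is unique and duplicates are detected in place.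
import Mathlib
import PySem

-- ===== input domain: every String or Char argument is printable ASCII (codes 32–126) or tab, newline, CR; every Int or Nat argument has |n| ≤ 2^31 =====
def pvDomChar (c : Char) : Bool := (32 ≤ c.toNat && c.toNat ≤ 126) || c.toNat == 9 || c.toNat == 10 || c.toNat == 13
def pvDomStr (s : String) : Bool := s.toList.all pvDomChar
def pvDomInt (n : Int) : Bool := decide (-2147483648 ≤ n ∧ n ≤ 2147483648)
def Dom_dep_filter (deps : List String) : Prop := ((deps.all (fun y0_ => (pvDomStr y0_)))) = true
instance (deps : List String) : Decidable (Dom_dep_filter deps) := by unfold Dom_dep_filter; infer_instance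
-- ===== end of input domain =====

-- B replaces A's dict-as-ordered-set plus final sort by a single pass that keeps the
-- header list sorted and duplicate-free via ordered insertion; objective: alternative.

-- ===== PORT A =====
def dep_filter_step (st : List String × PySem.Dict String (Option Unit)) (dep : String) :
    List String × PySem.Dict String (Option Unit) :=
  if PySem.Str.endswith dep ".c" then (st.1 ++ [dep], st.2)
  else if PySem.Str.startswith dep "/" then st
  else if st.2.contains dep then st
  else (st.1, st.2.insert dep none)

def dep_filter (deps : List String) : List String :=
  let st := deps.foldl dep_filter_step ([], PySem.Dict.empty)
  let hdr := PySem.List.sorted2 st.2.keys (fun x => (PySem.Str.count x "/" : Nat)) (fun x => x)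
  st.1 ++ hdr

-- ===== PORT B =====
-- Python tuple comparison (hdr[i].count("/"), hdr[i]) < (dep.count("/"), dep)
def hdrLt (a b : String) : Bool :=
  decide (PySem.Str.count a "/" < PySem.Str.count b "/") ||
    (PySem.Str.count a "/" == PySem.Str.count b "/" && decide (a < b))

-- Source B's while-scan + conditional hdr.insert(i, dep), as structural recursion on hdr
def hdrInsert (dep : String) : List String → List String
  | [] => [dep]
  | h :: t =>
      if hdrLt h dep then h :: hdrInsert dep t
      else if h = dep then h :: t
      else dep :: h :: t

def dep_filter_alt_step (st : List String × List String) (dep : String) :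
    List String × List String :=
  if PySem.Str.endswith dep ".c" then (st.1 ++ [dep], st.2)
  else if !PySem.Str.startswith dep "/" then (st.1, hdrInsert dep st.2)
  else st

def dep_filter_alt (deps : List String) : List String :=
  let st := deps.foldl dep_filter_alt_step ([], [])
  st.1 ++ st.2

-- ===== PRECONDITION & SPEC =====
def Spec_dep_filter (deps : List String) (out : List String) : Prop := out = dep_filter_alt deps
instance (deps : List String) (out : List String) : Decidable (Spec_dep_filter deps out) := by unfold Spec_dep_filter; infer_instance

-- ===== CLAIM =====
def Claim_equal_dep_filter : Prop := ∀ (deps : List String), Dom_dep_filter deps → Spec_dep_filter deps (dep_filter deps)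

-- ===== LEMMAS AND PROOFS =====

-- the sort key, packaged into a lexicographic order
def hdrKey (x : String) : Lex (Nat × String) := toLex (PySem.Str.count x "/", x)

theorem hdrKey_inj (a b : String) (h : hdrKey a = hdrKey b) : a = b := by
  have := congrArg (fun p : Lex (Nat × String) => (ofLex p).2) h
  simpa [hdrKey] using this

theorem hdrLt_iff (a b : String) : hdrLt a b = true ↔ hdrKey a < hdrKey b := by
  simp only [hdrKey, Prod.Lex.toLex_lt_toLex, hdrLt, Bool.or_eq_true, Bool.and_eq_true,
    beq_iff_eq, decide_eq_true_eq]

theorem mem_hdrInsert (x y : String) (l : List String) :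
    y ∈ hdrInsert x l ↔ y = x ∨ y ∈ l := by
  induction l with
  | nil => simp [hdrInsert]
  | cons h t ih =>
    simp only [hdrInsert]
    split_ifs with h1 h2
    · simp only [List.mem_cons, ih]; tauto
    · subst h2; simp only [List.mem_cons]; tauto
    · simp only [List.mem_cons]

theorem pairwise_hdrInsert (x : String) (l : List String)
    (hl : l.Pairwise (fun a b => hdrKey a < hdrKey b)) :
    (hdrInsert x l).Pairwise (fun a b => hdrKey a < hdrKey b) := by
  induction l with
  | nil => simp [hdrInsert]
  | cons h t ih =>
    rcases List.pairwise_cons.1 hl with ⟨hh, ht⟩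
    simp only [hdrInsert]
    split_ifs with h1 h2
    · refine List.pairwise_cons.2 ⟨?_, ih ht⟩
      intro y hy
      rcases (mem_hdrInsert x y t).1 hy with rfl | hy
      · exact (hdrLt_iff h y).1 h1
      · exact hh y hy
    · exact hl
    · have hxh : hdrKey x < hdrKey h := by
        rcases lt_trichotomy (hdrKey x) (hdrKey h) with h3 | h3 | h3
        · exact h3
        · exact absurd (hdrKey_inj x h h3).symm h2
        · exact absurd ((hdrLt_iff h x).2 h3) (by simpa using h1)
      refine List.pairwise_cons.2 ⟨?_, hl⟩
      intro y hy
      rcases hy with _ | hy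
      · exact hxh
      · exact lt_trans hxh (hh y (by assumption))

-- the header filter of both programs
def hdrFilt (d : String) : Bool := !PySem.Str.endswith d ".c" && !PySem.Str.startswith d "/"

theorem dep_filter_alt_inv (deps : List String) (src hdr : List String)
    (hp : hdr.Pairwise (fun a b => hdrKey a < hdrKey b)) :
    (deps.foldl dep_filter_alt_step (src, hdr)).1
        = src ++ deps.filter (fun x => PySem.Str.endswith x ".c")
    ∧ (deps.foldl dep_filter_alt_step (src, hdr)).2.Pairwise (fun a b => hdrKey a < hdrKey b)
    ∧ (∀ y, y ∈ (deps.foldl dep_filter_alt_step (src, hdr)).2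
          ↔ y ∈ hdr ∨ y ∈ deps.filter hdrFilt) := by
  induction deps generalizing src hdr with
  | nil => exact ⟨(List.append_nil src).symm, hp, by simp⟩
  | cons dep rest ih =>
    simp only [List.foldl_cons, List.filter_cons]
    cases hc : PySem.Str.endswith dep ".c" with
    | true =>
      simp only [dep_filter_alt_step, hc, hdrFilt, Bool.not_true, Bool.false_and, if_true]
      obtain ⟨h1, h2, h3⟩ := ih (src ++ [dep]) hdr hp
      refine ⟨?_, h2, by simpa using h3⟩
      rw [h1]; simp
    | false =>
      cases hs : PySem.Str.startswith dep "/" with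
      | true =>
        simp only [dep_filter_alt_step, hc, hs, hdrFilt, Bool.not_true, Bool.not_false,
          Bool.and_false, Bool.false_eq_true, if_false]
        obtain ⟨h1, h2, h3⟩ := ih src hdr hp
        exact ⟨h1, h2, by simpa using h3⟩
      | false =>
        simp only [dep_filter_alt_step, hc, hs, hdrFilt, Bool.not_false, Bool.and_self,
          Bool.false_eq_true, if_false, if_true]
        obtain ⟨h1, h2, h3⟩ := ih src (hdrInsert dep hdr) (pairwise_hdrInsert dep hdr hp)
        refine ⟨h1, h2, ?_⟩
        intro y
        rw [h3 y, mem_hdrInsert]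
        simp; tauto

theorem hdr_nodup (l : List String) (hp : l.Pairwise (fun a b => hdrKey a < hdrKey b)) :
    l.Nodup :=
  hp.imp (fun h => fun heq => absurd (congrArg hdrKey heq) (ne_of_lt h))

-- A-side dict bookkeeping
theorem dep_filter_contains_keys (d : PySem.Dict String (Option Unit)) (x : String) :
    PySem.Set.contains d.keys x = d.contains x := by
  simp only [PySem.Set.contains, PySem.Dict.contains, PySem.Dict.keys]
  rw [Bool.eq_iff_iff]
  simp

theorem dep_filter_keys_add (d : PySem.Dict String (Option Unit)) (dep : String) :
    (if d.contains dep then d else d.insert dep none).keys = PySem.Set.add d.keys dep := by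
  by_cases h : d.contains dep = true
  · have hk : PySem.Set.contains d.keys dep = true := by rw [dep_filter_contains_keys, h]
    rw [if_pos h]
    unfold PySem.Set.add
    rw [if_pos hk]
  · have hk : ¬ PySem.Set.contains d.keys dep = true := by
      rw [dep_filter_contains_keys]; exact h
    rw [if_neg h]
    unfold PySem.Set.add
    rw [if_neg hk]
    simp only [PySem.Dict.insert, if_neg h, PySem.Dict.keys, List.map_append, List.map_cons,
      List.map_nil]

theorem dep_filter_inv (deps : List String) (src : List String)
    (d : PySem.Dict String (Option Unit)) :
    (deps.foldl dep_filter_step (src, d)).1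
        = src ++ deps.filter (fun x => PySem.Str.endswith x ".c")
    ∧ (deps.foldl dep_filter_step (src, d)).2.keys
        = PySem.Set.update d.keys (deps.filter hdrFilt) := by
  induction deps generalizing src d with
  | nil => exact ⟨(List.append_nil src).symm, rfl⟩
  | cons dep rest ih =>
    simp only [List.foldl_cons, List.filter_cons]
    cases hc : PySem.Str.endswith dep ".c" with
    | true =>
      simp only [dep_filter_step, hc, hdrFilt, Bool.not_true, Bool.false_and, if_true]
      refine ⟨?_, (ih (src ++ [dep]) d).2⟩
      rw [(ih (src ++ [dep]) d).1]
      simp only [List.append_assoc, List.singleton_append]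
    | false =>
      cases hs : PySem.Str.startswith dep "/" with
      | true =>
        simp only [dep_filter_step, hc, hs, hdrFilt, Bool.not_true, Bool.not_false,
          Bool.and_false, reduceIte]
        exact ih src d
      | false =>
        cases hm : d.contains dep with
        | true =>
          simp only [dep_filter_step, hc, hs, hm, hdrFilt, Bool.not_false, Bool.and_self,
            Bool.false_eq_true, if_false, reduceIte]
          have hadd : PySem.Set.add d.keys dep = d.keys := by
            unfold PySem.Set.add
            rw [if_pos (by rw [dep_filter_contains_keys, hm])]
          refine ⟨(ih src d).1, ?_⟩
          rw [(ih src d).2]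
          simp only [PySem.Set.update, List.foldl_cons, hadd]
        | false =>
          simp only [dep_filter_step, hc, hs, hm, hdrFilt, Bool.not_false, Bool.and_self,
            Bool.false_eq_true, if_false, reduceIte]
          have hadd : (d.insert dep none).keys = PySem.Set.add d.keys dep := by
            rw [← dep_filter_keys_add d dep, if_neg (by rw [hm]; exact Bool.false_ne_true)]
          refine ⟨(ih src (d.insert dep none)).1, ?_⟩
          rw [(ih src (d.insert dep none)).2, hadd]
          simp only [PySem.Set.update, List.foldl_cons]

-- A's sorted2 comparator coincides with strict comparison under hdrKey
theorem sorted2_eq_sorted_hdrKey (xs : List String) :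
    PySem.List.sorted2 xs (fun x => (PySem.Str.count x "/" : Nat)) (fun x => x)
      = PySem.List.sorted xs hdrKey := by
  rw [PySem.List.sorted_eq_foldl_insertBy]
  show xs.foldl (fun acc x => PySem.List.insertBy
      (fun a b => decide (PySem.Str.count a "/" < PySem.Str.count b "/") ||
        (!decide (PySem.Str.count b "/" < PySem.Str.count a "/") && decide (a < b))) x acc) [] = _
  have hcmp : (fun a b : String =>
      decide (PySem.Str.count a "/" < PySem.Str.count b "/") ||
        (!decide (PySem.Str.count b "/" < PySem.Str.count a "/") && decide (a < b)))
      = fun a b : String => decide (hdrKey a < hdrKey b) := by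
    funext a b
    rw [Bool.eq_iff_iff]
    simp only [Bool.or_eq_true, Bool.and_eq_true, Bool.not_eq_eq_eq_not, Bool.not_true,
      decide_eq_true_eq, decide_eq_false_iff_not, not_lt, hdrKey, Prod.Lex.toLex_lt_toLex]
    constructor
    · rintro (h | ⟨h1, h2⟩)
      · exact Or.inl h
      · rcases lt_or_eq_of_le h1 with h3 | h3
        · exact Or.inl h3
        · exact Or.inr ⟨h3, h2⟩
    · rintro (h | ⟨h1, h2⟩)
      · exact Or.inl h
      · exact Or.inr ⟨le_of_eq h1, h2⟩
  rw [hcmp]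

-- ===== VERDICT =====
theorem dep_filter_spec : Claim_equal_dep_filter := by
  intro deps _
  show dep_filter deps = dep_filter_alt deps
  unfold dep_filter dep_filter_alt
  simp only
  obtain ⟨ha1, ha2⟩ := dep_filter_inv deps [] PySem.Dict.empty
  obtain ⟨hb1, hb2, hb3⟩ :=
    dep_filter_alt_inv deps [] [] (by simp)
  rw [ha1, ha2, hb1]
  congr 1
  rw [sorted2_eq_sorted_hdrKey]
  have hF : PySem.Set.update (PySem.Dict.empty (κ := String) (ν := Option Unit)).keys
      (deps.filter hdrFilt) = PySem.Set.ofList (deps.filter hdrFilt) := rfl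
  rw [hF]
  refine PySem.List.sorted_eq_of_perm_of_pairwise_lt _ _ hdrKey ?_ hb2
  rw [List.perm_ext_iff_of_nodup (hdr_nodup _ hb2) (PySem.Set.nodup_ofList _)]
  intro y
  rw [hb3 y, PySem.Set.mem_ofList]
  simp
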